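-- pv_equiv track=rewrite | github.com/jio-ping/coding-test | 181935.py | solution
-- ===== SOURCE A (Python) =====
-- def solution(n):
--     count = 0
--     for i in range (n,0,-2):
--         if i % 2 == 0:
--             count += i**2
--         else:
--             count += i
--     return count
-- ===== SOURCE B (Python) =====
-- def solution(n):
--     # Closed-form O(1): even terms contribute squares (even square-sum formula),
--     # odd terms contribute themselves (sum of first m odds = m^2).
--     if n <= 0:
--         return 0
--     if n % 2 == 0:
--         m = n // 2
--         return 2 * m * (m + 1) * (2 * m + 1) // 3
--     m = (n + 1) // 2
--     return m * m
-- ===== Notes on version B (the rewrite author's own statement) =====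
-- stated objective: faster
-- what changed: Replaces the O(n) loop over range(n,0,-2) with O(1) closed-form arithmetic: the even-square-sum formula 2m(m+1)(2m+1)/3 for even n and the sum-of-first-m-odds formula m^2 for odd n.
import Mathlib
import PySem

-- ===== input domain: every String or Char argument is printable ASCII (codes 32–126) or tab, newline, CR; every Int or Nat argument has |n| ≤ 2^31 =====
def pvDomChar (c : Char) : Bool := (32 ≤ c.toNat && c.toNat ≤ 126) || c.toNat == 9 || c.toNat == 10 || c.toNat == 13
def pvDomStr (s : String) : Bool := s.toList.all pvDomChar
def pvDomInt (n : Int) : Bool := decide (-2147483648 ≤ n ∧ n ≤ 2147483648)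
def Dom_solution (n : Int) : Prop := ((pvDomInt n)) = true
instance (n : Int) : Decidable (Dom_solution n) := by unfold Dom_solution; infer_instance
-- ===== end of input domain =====

-- B replaces A's O(n) loop by O(1) closed-form parity arithmetic (objective: faster, asymptotic).

-- ===== PORT A =====
def solution (n : Int) : Int :=
  (PySem.List.pyRange n 0 (-2)).foldl
    (fun count i => if PySem.Int.mod i 2 = 0 then count + i ^ 2 else count + i) 0

-- ===== PORT B =====
def solution_alt (n : Int) : Int :=
  if n ≤ 0 then 0
  else if PySem.Int.mod n 2 = 0 then
    let m := PySem.Int.floordiv n 2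
    PySem.Int.floordiv (2 * m * (m + 1) * (2 * m + 1)) 3
  else
    let m := PySem.Int.floordiv (n + 1) 2
    m * m

-- ===== PRECONDITION & SPEC =====
def Spec_solution (n : Int) (out : Int) : Prop := out = solution_alt n
instance (n : Int) (out : Int) : Decidable (Spec_solution n out) := by unfold Spec_solution; infer_instance

-- ===== CLAIM (what is proved, stated in full; the proofs are below) =====
def Claim_equal_solution : Prop := ∀ (n : Int), Dom_solution n → Spec_solution n (solution n)

-- ===== LEMMAS AND PROOFS =====

-- the per-element contribution of A's loop body
def pvG (i : Int) : Int := if PySem.Int.mod i 2 = 0 then i ^ 2 else i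

lemma pv_foldl_g (l : List Int) (acc : Int) :
    l.foldl (fun count i => if PySem.Int.mod i 2 = 0 then count + i ^ 2 else count + i) acc
      = acc + (l.map pvG).sum := by
  induction l generalizing acc with
  | nil => simp
  | cons x xs ih =>
      simp only [List.foldl_cons, List.map_cons, List.sum_cons, ih, pvG]
      split_ifs <;> ring

lemma pv_range_nil (n : Int) (h : n ≤ 0) : PySem.List.pyRange n 0 (-2) = [] := by
  unfold PySem.List.pyRange
  norm_num
  omega

lemma pv_range_cons (n : Int) (h : 0 < n) :
    PySem.List.pyRange n 0 (-2) = n :: PySem.List.pyRange (n - 2) 0 (-2) := by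
  unfold PySem.List.pyRange
  norm_num
  rcases (by omega : 2 < n ∨ n ≤ 2) with h2 | h2
  · have hc : ((n + 2 - 1) / 2).toNat = ((n - 1) / 2).toNat + 1 := by omega
    rw [if_pos h, if_pos h2, hc, List.range_succ_eq_map]
    simp only [List.map_cons, List.map_map]
    congr 1
    · norm_num
    · apply List.map_congr_left
      intro k _
      simp only [Function.comp_apply]
      push_cast
      ring
  · have hc : ((n + 2 - 1) / 2).toNat = 1 := by omega
    rw [if_pos h, if_neg (by omega : ¬ 2 < n), hc]
    simp

lemma pv_three_dvd (m : Int) : (3:Int) ∣ 2 * m * (m + 1) * (2 * m + 1) := by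
  rcases (by omega : m % 3 = 0 ∨ m % 3 = 1 ∨ m % 3 = 2) with h | h | h
  · obtain ⟨q, hq⟩ : ∃ q, m = 3 * q := ⟨m / 3, by omega⟩
    exact ⟨2 * q * (m + 1) * (2 * m + 1), by rw [hq]; ring⟩
  · obtain ⟨q, hq⟩ : ∃ q, m = 3 * q + 1 := ⟨m / 3, by omega⟩
    exact ⟨2 * m * (m + 1) * (2 * q + 1), by rw [hq]; ring⟩
  · obtain ⟨q, hq⟩ : ∃ q, m = 3 * q + 2 := ⟨m / 3, by omega⟩
    exact ⟨2 * m * (q + 1) * (2 * m + 1), by rw [hq]; ring⟩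

lemma pv_sum_closed : ∀ (k : Nat) (n : Int), n.toNat ≤ k →
    ((PySem.List.pyRange n 0 (-2)).map pvG).sum = solution_alt n := by
  intro k
  induction k with
  | zero =>
      intro n hn
      have hn0 : n ≤ 0 := by omega
      rw [pv_range_nil n hn0]
      simp [solution_alt, hn0]
  | succ k ih =>
      intro n hn
      rcases (by omega : n ≤ 0 ∨ 0 < n) with h0 | h0
      · rw [pv_range_nil n h0]; simp [solution_alt, h0]
      · rw [pv_range_cons n h0]
        simp only [List.map_cons, List.sum_cons]
        rw [ih (n - 2) (by omega)]
        -- now arithmetic on the closed form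
        rcases Int.even_or_odd n with ⟨m, hm⟩ | ⟨m, hm⟩
        · -- n = 2m, m ≥ 1: even-square-sum closed form
          have hm1 : 1 ≤ m := by omega
          have hmod : PySem.Int.mod n 2 = 0 := by
            rw [PySem.Int.mod_eq_emod_of_pos (by norm_num)]; omega
          have hfd : PySem.Int.floordiv n 2 = m := by
            rw [PySem.Int.floordiv_eq_ediv_of_pos (by norm_num)]; omega
          obtain ⟨A, hA⟩ : (3:Int) ∣ 2 * m * (m + 1) * (2 * m + 1) :=
            pv_three_dvd m
          have eA : PySem.Int.floordiv (2 * m * (m + 1) * (2 * m + 1)) 3 = A := by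
            rw [PySem.Int.floordiv_eq_ediv_of_pos (by norm_num), hA]
            exact Int.mul_ediv_cancel_left _ (by norm_num)
          have hGn : pvG n = n ^ 2 := by unfold pvG; rw [if_pos hmod]
          rcases (by omega : m = 1 ∨ 2 ≤ m) with hm2 | hm2
          · subst hm2
            simp only [hGn, solution_alt]
            rw [if_neg (by omega : ¬ n ≤ 0), if_pos hmod, hfd,
                if_pos (by omega : n - 2 ≤ 0), eA]
            have : A = 4 := by omega
            rw [this]; nlinarith [sq_nonneg n, hm]
          · have hmod2 : PySem.Int.mod (n - 2) 2 = 0 := by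
              rw [PySem.Int.mod_eq_emod_of_pos (by norm_num)]; omega
            have hfd2 : PySem.Int.floordiv (n - 2) 2 = m - 1 := by
              rw [PySem.Int.floordiv_eq_ediv_of_pos (by norm_num)]; omega
            obtain ⟨B, hB⟩ : (3:Int) ∣ 2 * (m - 1) * (m - 1 + 1) * (2 * (m - 1) + 1) :=
              pv_three_dvd (m - 1)
            have eB : PySem.Int.floordiv (2 * (m - 1) * (m - 1 + 1) * (2 * (m - 1) + 1)) 3 = B := by
              rw [PySem.Int.floordiv_eq_ediv_of_pos (by norm_num), hB]
              exact Int.mul_ediv_cancel_left _ (by norm_num)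
            simp only [hGn, solution_alt]
            rw [if_neg (by omega : ¬ n ≤ 0), if_pos hmod, hfd, eA,
                if_neg (by omega : ¬ n - 2 ≤ 0), if_pos hmod2, hfd2, eB]
            have hdiff : 2 * m * (m + 1) * (2 * m + 1) -
                2 * (m - 1) * (m - 1 + 1) * (2 * (m - 1) + 1) = 12 * (m * m) := by ring
            have hn2 : n ^ 2 = 4 * (m * m) := by rw [hm]; ring
            rw [hn2]
            linarith [hA, hB, hdiff]
        · -- n = 2m+1: sum of first (m+1) odd numbers
          have hm0 : 0 ≤ m := by omega
          have hmod : ¬ PySem.Int.mod n 2 = 0 := by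
            rw [PySem.Int.mod_eq_emod_of_pos (by norm_num)]; omega
          have hfd : PySem.Int.floordiv (n + 1) 2 = m + 1 := by
            rw [PySem.Int.floordiv_eq_ediv_of_pos (by norm_num)]; omega
          have hGn : pvG n = n := by unfold pvG; rw [if_neg hmod]
          rcases (by omega : m = 0 ∨ 1 ≤ m) with hm2 | hm2
          · subst hm2
            simp only [hGn, solution_alt]
            rw [if_neg (by omega : ¬ n ≤ 0), if_neg hmod, hfd,
                if_pos (by omega : n - 2 ≤ 0)]
            omega
          · have hmod2 : ¬ PySem.Int.mod (n - 2) 2 = 0 := by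
              rw [PySem.Int.mod_eq_emod_of_pos (by norm_num)]; omega
            have hfd2 : PySem.Int.floordiv (n - 2 + 1) 2 = m := by
              rw [PySem.Int.floordiv_eq_ediv_of_pos (by norm_num)]; omega
            simp only [hGn, solution_alt]
            rw [if_neg (by omega : ¬ n ≤ 0), if_neg hmod, hfd,
                if_neg (by omega : ¬ n - 2 ≤ 0), if_neg hmod2, hfd2]
            nlinarith [hm]

-- ===== VERDICT (by name: the statement is the Claim_ definition above) =====
theorem solution_spec : Claim_equal_solution := by
  intro n _
  unfold Spec_solution solution
  rw [pv_foldl_g, zero_add]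
  exact pv_sum_closed n.toNat n le_rfl
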